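-- pv_equiv track=rewrite | github.com/blhwong/algos_py | algo_exp/rectangle_mania/main.py | get_coords_table
-- ===== SOURCE A (Python) =====
-- UP = 'UP'
--
-- RIGHT = 'RIGHT'
--
-- DOWN = 'DOWN'
--
-- LEFT = 'LEFT'
--
-- def get_direction(coord1, coord2):
--     x1, y1 = coord1
--     x2, y2 = coord2
--
--     if x1 == x2:
--         if y2 > y1:
--             return UP
--         if y2 < y1:
--             return DOWN
--     elif y1 == y2:
--         if x2 > x1:
--             return RIGHT
--         if x2 < x1:
--             return LEFT
--
--     return ''
--
-- def get_coords_table(coords):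
--     coords_table = {}
--
--     for coord1 in coords:
--         x, y = coord1
--         curr = { UP: [], RIGHT: [], DOWN: [], LEFT: []}
--         for coord2 in coords:
--             direction = get_direction(coord1, coord2)
--             if direction in curr:
--                 curr[direction].append(coord2)
--
--         coords_table[(x, y)] = curr
--
--     return coords_table
-- ===== SOURCE B (Python) =====
-- UP = 'UP'
-- RIGHT = 'RIGHT'
-- DOWN = 'DOWN'
-- LEFT = 'LEFT'
--
-- def get_coords_table(coords):
--     cols = {}
--     rows = {}
--     for p in coords:
--         cols.setdefault(p[0], []).append(p)
--         rows.setdefault(p[1], []).append(p)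
--     table = {}
--     for x, y in coords:
--         col = cols[x]
--         row = rows[y]
--         table[(x, y)] = {
--             UP: [q for q in col if q[1] > y],
--             RIGHT: [q for q in row if q[0] > x],
--             DOWN: [q for q in col if q[1] < y],
--             LEFT: [q for q in row if q[0] < x],
--         }
--     return table
-- ===== Notes on version B (the rewrite author's own statement) =====
-- stated objective: faster
-- what changed: Instead of the nested O(n^2) scan comparing every point with every other point, B indexes the points once into row (same y) and column (same x) buckets and builds each point's four direction lists by filtering only its own two buckets.
import Mathlib
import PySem

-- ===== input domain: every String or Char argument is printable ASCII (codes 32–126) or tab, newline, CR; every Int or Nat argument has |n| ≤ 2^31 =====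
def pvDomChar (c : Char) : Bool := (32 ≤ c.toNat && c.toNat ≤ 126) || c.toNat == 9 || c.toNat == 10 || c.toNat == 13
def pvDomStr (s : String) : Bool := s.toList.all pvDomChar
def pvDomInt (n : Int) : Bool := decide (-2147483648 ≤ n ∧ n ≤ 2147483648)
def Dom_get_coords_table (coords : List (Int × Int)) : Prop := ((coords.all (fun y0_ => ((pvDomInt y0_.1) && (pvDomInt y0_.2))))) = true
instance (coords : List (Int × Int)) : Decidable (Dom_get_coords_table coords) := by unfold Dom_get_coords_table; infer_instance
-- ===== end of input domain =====

-- B replaces A's nested all-pairs scan with row/column buckets built once, filtering only each point's own two buckets.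


-- ===== PORT A =====
def get_direction (coord1 coord2 : Int × Int) : String :=
  let x1 := coord1.1; let y1 := coord1.2
  let x2 := coord2.1; let y2 := coord2.2
  if x1 = x2 then
    (if y2 > y1 then "UP" else if y2 < y1 then "DOWN" else "")
  else if y1 = y2 then
    (if x2 > x1 then "RIGHT" else if x2 < x1 then "LEFT" else "")
  else ""

-- the body of A's inner loop: 'if direction in curr: curr[direction].append(coord2)'
def dirStep (coord1 : Int × Int) (cur : PySem.Dict String (List (Int × Int))) (coord2 : Int × Int) :
    PySem.Dict String (List (Int × Int)) :=
  let direction := get_direction coord1 coord2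
  if cur.contains direction then cur.modify direction [] (· ++ [coord2]) else cur

-- A's whole inner loop for one coord1: 'curr = {UP: [], ...}; for coord2 in coords: ...'
def buildCurr (coords : List (Int × Int)) (coord1 : Int × Int) : PySem.Dict String (List (Int × Int)) :=
  coords.foldl (dirStep coord1)
    (PySem.Dict.ofList [("UP", []), ("RIGHT", []), ("DOWN", []), ("LEFT", [])])

def get_coords_table (coords : List (Int × Int)) : List (Int × Int × List (String × List (Int × Int))) :=
  (coords.foldl (fun t coord1 => t.insert (coord1.1, coord1.2) (buildCurr coords coord1))
    (PySem.Dict.empty : PySem.Dict (Int × Int) (PySem.Dict String (List (Int × Int))))).items.map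
    (fun kv => (kv.1.1, kv.1.2, kv.2.items))

-- ===== PORT B =====
-- 'cols.setdefault(p[0], []).append(p)' (and the same for rows with p[1])
def bucketBy (key : Int × Int → Int) (coords : List (Int × Int)) : PySem.Dict Int (List (Int × Int)) :=
  coords.foldl (fun d p => d.modify (key p) [] (· ++ [p])) PySem.Dict.empty

-- the dict B stores for one point: filters over that point's column and row buckets
def altEntry (cols rows : PySem.Dict Int (List (Int × Int))) (p : Int × Int) :
    List (String × List (Int × Int)) :=
  let col := cols.getD p.1 []
  let row := rows.getD p.2 []
  [("UP",    col.filter (fun q => q.2 > p.2)),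
   ("RIGHT", row.filter (fun q => q.1 > p.1)),
   ("DOWN",  col.filter (fun q => q.2 < p.2)),
   ("LEFT",  row.filter (fun q => q.1 < p.1))]

def get_coords_table_alt (coords : List (Int × Int)) : List (Int × Int × List (String × List (Int × Int))) :=
  (coords.foldl (fun t p => t.insert (p.1, p.2) (altEntry (bucketBy (·.1) coords) (bucketBy (·.2) coords) p))
    (PySem.Dict.empty : PySem.Dict (Int × Int) (List (String × List (Int × Int))))).items.map
    (fun kv => (kv.1.1, kv.1.2, kv.2))

-- ===== PRECONDITION & SPEC =====
def Spec_get_coords_table (coords : List (Int × Int)) (out : List (Int × Int × List (String × List (Int × Int)))) : Prop := out = get_coords_table_alt coords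
instance (coords : List (Int × Int)) (out : List (Int × Int × List (String × List (Int × Int)))) : Decidable (Spec_get_coords_table coords out) := by
  unfold Spec_get_coords_table
  letI : DecidableEq (String × List (Int × Int)) := instDecidableEqProd
  letI : DecidableEq (List (String × List (Int × Int))) := instDecidableEqList
  letI : DecidableEq (Int × List (String × List (Int × Int))) := instDecidableEqProd
  letI : DecidableEq (Int × Int × List (String × List (Int × Int))) := instDecidableEqProd
  exact instDecidableEqList _ _

-- ===== CLAIM (what is proved, stated in full; the proofs are below) =====
def Claim_equal_get_coords_table : Prop := ∀ (coords : List (Int × Int)), Dom_get_coords_table coords → Spec_get_coords_table coords (get_coords_table coords)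

-- ===== LEMMAS AND PROOFS =====

-- lookup in the literal 4-key direction dict
theorem getD_mk4 (a b c d : List (Int × Int)) (k : String) :
    (PySem.Dict.mk [("UP", a), ("RIGHT", b), ("DOWN", c), ("LEFT", d)]).getD k [] =
    (if "UP" = k then a else if "RIGHT" = k then b else if "DOWN" = k then c else if "LEFT" = k then d else []) := by
  rw [PySem.Dict.getD_eq_get?_getD]
  simp only [PySem.Dict.get?_mk_cons, beq_iff_eq]
  split_ifs <;> simp_all [PySem.Dict.get?]

-- one step of A's inner loop on the 4-key direction dict, split by where coord2 lies relative to coord1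
set_option maxHeartbeats 1000000 in
theorem dirStep_eq (c1 p : Int × Int) (a b c d : List (Int × Int)) :
    dirStep c1 (PySem.Dict.mk [("UP", a), ("RIGHT", b), ("DOWN", c), ("LEFT", d)]) p
    = PySem.Dict.mk
        [("UP",    if p.1 = c1.1 ∧ p.2 > c1.2 then a ++ [p] else a),
         ("RIGHT", if p.2 = c1.2 ∧ p.1 > c1.1 then b ++ [p] else b),
         ("DOWN",  if p.1 = c1.1 ∧ p.2 < c1.2 then c ++ [p] else c),
         ("LEFT",  if p.2 = c1.2 ∧ p.1 < c1.1 then d ++ [p] else d)] := by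
  by_cases hx : c1.1 = p.1
  · rcases lt_trichotomy c1.2 p.2 with hy | hy | hy
    · have h1 : ¬ p.2 < c1.2 := by omega
      have h2 : ¬ p.2 = c1.2 := by omega
      have hd : get_direction c1 p = "UP" := by
        simp only [get_direction]; split_ifs <;> first | rfl | omega
      simp only [dirStep, hd]
      rw [if_pos (by simp [pysem])]
      apply PySem.Dict.ext
      rw [PySem.Dict.modify, PySem.Dict.items_insert, getD_mk4]
      simp only [PySem.Dict.contains_mk]
      simp [hx.symm, hy, h1, h2]
    · have h1 : ¬ p.2 < c1.2 := by omega
      have h2 : ¬ c1.2 < p.2 := by omega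
      have hd : get_direction c1 p = "" := by
        simp only [get_direction]; split_ifs <;> first | rfl | omega
      simp only [dirStep, hd]
      rw [if_neg (by simp [pysem])]
      apply PySem.Dict.ext
      simp [hx.symm, h1, h2]
    · have h1 : ¬ c1.2 < p.2 := by omega
      have h2 : ¬ p.2 = c1.2 := by omega
      have hd : get_direction c1 p = "DOWN" := by
        simp only [get_direction]; split_ifs <;> first | rfl | omega
      simp only [dirStep, hd]
      rw [if_pos (by simp [pysem])]
      apply PySem.Dict.ext
      rw [PySem.Dict.modify, PySem.Dict.items_insert, getD_mk4]
      simp only [PySem.Dict.contains_mk]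
      simp [hx.symm, hy, h1, h2]
  · by_cases hyy : c1.2 = p.2
    · rcases lt_trichotomy c1.1 p.1 with hx2 | hx2 | hx2
      · have h1 : ¬ p.1 < c1.1 := by omega
        have h2 : ¬ p.1 = c1.1 := by omega
        have hd : get_direction c1 p = "RIGHT" := by
          simp only [get_direction]; split_ifs <;> first | rfl | omega
        simp only [dirStep, hd]
        rw [if_pos (by simp [pysem])]
        apply PySem.Dict.ext
        rw [PySem.Dict.modify, PySem.Dict.items_insert, getD_mk4]
        simp only [PySem.Dict.contains_mk]
        simp [hyy.symm, hx2, h1, h2]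
      · exact absurd hx2 hx
      · have h1 : ¬ c1.1 < p.1 := by omega
        have h2 : ¬ p.1 = c1.1 := by omega
        have hd : get_direction c1 p = "LEFT" := by
          simp only [get_direction]; split_ifs <;> first | rfl | omega
        simp only [dirStep, hd]
        rw [if_pos (by simp [pysem])]
        apply PySem.Dict.ext
        rw [PySem.Dict.modify, PySem.Dict.items_insert, getD_mk4]
        simp only [PySem.Dict.contains_mk]
        simp [hyy.symm, hx2, h1, h2]
    · have h1 : ¬ p.1 = c1.1 := by omega
      have h2 : ¬ p.2 = c1.2 := by omega
      have hd : get_direction c1 p = "" := by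
        simp only [get_direction]; split_ifs <;> first | rfl | omega
      simp only [dirStep, hd]
      rw [if_neg (by simp [pysem])]
      apply PySem.Dict.ext
      simp [h1, h2]

-- A's inner loop appends each matching point of l to its direction slot
theorem foldl_dirStep_items (c1 : Int × Int) (l : List (Int × Int)) (a b c d : List (Int × Int)) :
    (l.foldl (dirStep c1) (PySem.Dict.mk [("UP", a), ("RIGHT", b), ("DOWN", c), ("LEFT", d)]))
    = PySem.Dict.mk
       [("UP",    a ++ l.filter (fun q => q.1 = c1.1 ∧ q.2 > c1.2)),
        ("RIGHT", b ++ l.filter (fun q => q.2 = c1.2 ∧ q.1 > c1.1)),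
        ("DOWN",  c ++ l.filter (fun q => q.1 = c1.1 ∧ q.2 < c1.2)),
        ("LEFT",  d ++ l.filter (fun q => q.2 = c1.2 ∧ q.1 < c1.1))] := by
  induction l generalizing a b c d with
  | nil => simp
  | cons p l ih =>
    rw [List.foldl_cons, dirStep_eq, ih]
    apply PySem.Dict.ext
    simp only [List.filter_cons, decide_eq_true_eq]
    split_ifs <;> simp_all [List.append_assoc]

-- B's buckets: the bucket at x holds exactly the points of coords whose key is x, in order
theorem bucketBy_getD (key : Int × Int → Int) (coords : List (Int × Int)) (x : Int) :
    (bucketBy key coords).getD x [] = coords.filter (fun q => key q = x) := by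
  unfold bucketBy
  have hm : coords.foldl (fun d p => d.modify (key p) [] (· ++ [p]))
        (PySem.Dict.empty : PySem.Dict Int (List (Int × Int)))
      = (coords.map (fun p : Int × Int => (key p, p))).foldl
          (fun d q => d.modify q.1 [] (· ++ [q.2])) PySem.Dict.empty := by
    rw [List.foldl_map]
  rw [hm, PySem.Dict.getD_foldl_modify_append, List.filter_map]
  simp only [PySem.Dict.getD_empty, List.nil_append, List.map_map, Function.comp_def]
  rw [List.map_id_fun']
  exact List.filter_congr (fun q _ => by rfl)

-- B's entry for a point equals the items of A's inner dict for that point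
theorem altEntry_eq (coords : List (Int × Int)) (p : Int × Int) :
    altEntry (bucketBy (·.1) coords) (bucketBy (·.2) coords) p
    = (buildCurr coords p).items := by
  unfold buildCurr
  rw [show (PySem.Dict.ofList [("UP", ([] : List (Int × Int))), ("RIGHT", []), ("DOWN", []), ("LEFT", [])])
      = PySem.Dict.mk [("UP", []), ("RIGHT", []), ("DOWN", []), ("LEFT", [])] from by decide]
  rw [foldl_dirStep_items]
  simp only [altEntry, bucketBy_getD, List.filter_filter, List.nil_append]
  have e : ∀ (u v : Int × Int → Prop) [DecidablePred u] [DecidablePred v],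
      (coords.filter (fun q => decide (u q) && decide (v q)))
      = coords.filter (fun q => decide (v q ∧ u q)) := by
    intro u v _ _
    apply List.filter_congr
    intro q _
    simp [Bool.and_comm]
  rw [e, e, e, e]

-- folding inserts of pointwise-related values over related dicts keeps items related by the value map
theorem items_foldl_insert_map {α ν ν' : Type} (f : ν → ν') (key : α → Int × Int)
    (v1 : α → ν) (v2 : α → ν') (hv : ∀ x, v2 x = f (v1 x)) :
    ∀ (l : List α) (d1 : PySem.Dict (Int × Int) ν) (d2 : PySem.Dict (Int × Int) ν'),
      d2.items = d1.items.map (fun kv => (kv.1, f kv.2)) →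
      (l.foldl (fun t x => t.insert (key x) (v2 x)) d2).items
      = (l.foldl (fun t x => t.insert (key x) (v1 x)) d1).items.map (fun kv => (kv.1, f kv.2)) := by
  intro l
  induction l with
  | nil => intro d1 d2 hd; simpa using hd
  | cons x l ih =>
    intro d1 d2 hd
    rw [List.foldl_cons, List.foldl_cons]
    apply ih
    have hc : d2.contains (key x) = d1.contains (key x) := by
      rw [PySem.Dict.contains_eq_decide_mem_keys, PySem.Dict.contains_eq_decide_mem_keys]
      have hk : d2.keys = d1.keys := by
        simp [PySem.Dict.keys, hd, List.map_map, Function.comp_def]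
      rw [hk]
    rw [PySem.Dict.items_insert, PySem.Dict.items_insert, hc]
    by_cases h : d1.contains (key x) = true
    · simp only [h, if_true, hd, List.map_map]
      apply List.map_congr_left
      intro kv _
      by_cases hk2 : kv.1 = key x <;> simp [hk2, hv]
    · simp [h, hd, hv]

theorem get_coords_table_spec : Claim_equal_get_coords_table := by
  intro coords _
  unfold Spec_get_coords_table
  show get_coords_table coords = get_coords_table_alt coords
  unfold get_coords_table get_coords_table_alt
  rw [items_foldl_insert_map (f := PySem.Dict.items) (key := fun p : Int × Int => (p.1, p.2))
      (v1 := fun coord1 => buildCurr coords coord1)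
      (v2 := fun p => altEntry (bucketBy (·.1) coords) (bucketBy (·.2) coords) p)
      (fun p => altEntry_eq coords p) coords PySem.Dict.empty PySem.Dict.empty rfl]
  simp [List.map_map, Function.comp_def]
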